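-- pv_equiv track=rewrite | github.com/zhuli19901106/leetcode-zhuli | algorithms/1501-2000/1839_longest-substring-of-all-vowels-in-order_1_AC.py | longestBeautifulSubstring
-- ===== SOURCE A (Python) =====
-- def longestBeautifulSubstring(word: str) -> int:
--     s = word
--     n = len(s)
--     st = set()
--
--     res = 0
--     i = 0
--     while i < n:
--         st.clear()
--         st.add(s[i])
--         j = i + 1
--         while j < n and s[j] >= s[j - 1]:
--             st.add(s[j])
--             j += 1
--         if len(st) == 5:
--             res = max(res, j - i)
--         i = j
--     return res
-- ===== SOURCE B (Python) =====
-- def longestBeautifulSubstring(word: str) -> int: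
--     # Offline index arithmetic instead of nested scanning: a prefix-sum array of
--     # strict increases plus the list of run boundaries; a run [a, b) has five
--     # distinct characters iff it contains exactly four strict increases.
--     n = len(word)
--     P = [0] * (n + 1)
--     for i in range(1, n):
--         P[i] = P[i - 1] + (1 if word[i] > word[i - 1] else 0)
--     bounds = [i for i in range(n) if i == 0 or word[i] < word[i - 1]] + [n]
--     res = 0
--     for a, b in zip(bounds, bounds[1:]):
--         if P[b - 1] - P[a] == 4:
--             res = max(res, b - a)
--     return res
-- ===== Notes on version B (the rewrite author's own statement) =====
-- stated objective: alternative
-- what changed: Replaced the nested run-scan with a per-run set by an offline index-arithmetic algorithm: one pass builds a prefix-sum array of strict increases, a comprehension lists run boundaries, and a final pass over consecutive boundary pairs keeps runs whose boundary pair spans exactly four strict increases (= five distinct characters).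
import Mathlib
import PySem

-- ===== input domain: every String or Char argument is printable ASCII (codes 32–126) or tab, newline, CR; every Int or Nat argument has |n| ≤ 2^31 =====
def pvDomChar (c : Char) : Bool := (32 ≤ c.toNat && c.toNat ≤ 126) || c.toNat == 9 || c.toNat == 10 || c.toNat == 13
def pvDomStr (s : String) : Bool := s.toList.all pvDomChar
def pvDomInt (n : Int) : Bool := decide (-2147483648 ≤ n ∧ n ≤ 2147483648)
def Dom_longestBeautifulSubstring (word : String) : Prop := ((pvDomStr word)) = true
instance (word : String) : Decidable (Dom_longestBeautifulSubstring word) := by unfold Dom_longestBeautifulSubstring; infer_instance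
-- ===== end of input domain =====

-- B replaces A's nested run-scan with a per-run set by staged index arithmetic:
-- a prefix-sum array of strict increases, a run-boundary list, and one pass over
-- consecutive boundary pairs; same return value, a genuinely different algorithm.


-- ===== PORT A =====
-- inner while loop: 'while j < n and s[j] >= s[j-1]: st.add(s[j]); j += 1'
-- (s[j], s[j-1] are always in range under the guard, so List.getD is exact here)
def pvInnerA (s : List Char) (st : PySem.Set Char) (j : Nat) :
    PySem.Set Char × Nat :=
  if h : j < s.length ∧ s.getD (j-1) ' ' ≤ s.getD j ' ' then
    pvInnerA s (PySem.Set.add st (s.getD j ' ')) (j+1)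
  else (st, j)
termination_by s.length - j
decreasing_by omega

-- the returned j never decreases (used here for outer-loop termination)
theorem pvInnerA_ge (s : List Char) (st : PySem.Set Char) (j : Nat) :
    j ≤ (pvInnerA s st j).2 := by
  rw [pvInnerA]
  split
  · next h =>
    have := pvInnerA_ge s (PySem.Set.add st (s.getD j ' ')) (j+1)
    omega
  · simp
termination_by s.length - j
decreasing_by omega

-- outer while loop: 'while i < n: st = {s[i]}; inner; if len(st)==5: res = max(res, j-i); i = j'
def pvOuterA (s : List Char) (res : Int) (i : Nat) : Int :=
  if _h : i < s.length then
    let p := pvInnerA s (PySem.Set.add PySem.Set.empty (s.getD i ' ')) (i+1)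
    pvOuterA s
      (if p.1.length = 5 then max res ((p.2 : Int) - (i : Int)) else res) p.2
  else res
termination_by s.length - i
decreasing_by
  have := pvInnerA_ge s (PySem.Set.add PySem.Set.empty (s.getD i ' ')) (i+1)
  omega

def longestBeautifulSubstring (word : String) : Int :=
  pvOuterA word.toList 0 0

-- ===== PORT B =====
-- 'for i in range(1, n): P[i] = P[i-1] + (1 if word[i] > word[i-1] else 0)'
-- (indices 1 ≤ i ≤ n-1 are always in range, so List.getD / List.set are exact)
def pvPB (s : List Char) : List Int :=
  (List.range' 1 (s.length - 1)).foldl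
    (fun P i => P.set i (P.getD (i-1) 0 + (if s.getD (i-1) ' ' < s.getD i ' ' then 1 else 0)))
    (List.replicate (s.length + 1) 0)

-- 'i == 0 or word[i] < word[i-1]'  (Python's or short-circuits; for i ≥ 1 both indices in range)
def pvIsStartB (s : List Char) (i : Nat) : Bool :=
  i == 0 || decide (s.getD i ' ' < s.getD (i-1) ' ')

-- 'bounds = [i for i in range(n) if i == 0 or word[i] < word[i-1]] + [n]'
def pvBoundsB (s : List Char) : List Nat :=
  (List.range s.length).filter (pvIsStartB s) ++ [s.length]

-- 'for a, b in zip(bounds, bounds[1:]): if P[b-1] - P[a] == 4: res = max(res, b-a)'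
def pvZipFoldB (P : List Int) (res : Int) (l : List Nat) : Int :=
  (l.zip l.tail).foldl
    (fun res ab =>
      if P.getD (ab.2 - 1) 0 - P.getD ab.1 0 = 4 then max res ((ab.2 : Int) - (ab.1 : Int))
      else res)
    res

def longestBeautifulSubstring_alt (word : String) : Int :=
  pvZipFoldB (pvPB word.toList) 0 (pvBoundsB word.toList)

-- ===== PRECONDITION & SPEC =====
def Spec_longestBeautifulSubstring (word : String) (out : Int) : Prop := out = longestBeautifulSubstring_alt word
instance (word : String) (out : Int) : Decidable (Spec_longestBeautifulSubstring word out) := by unfold Spec_longestBeautifulSubstring; infer_instance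

-- ===== CLAIM (what is proved, stated in full; the proofs are below) =====
def Claim_equal_longestBeautifulSubstring : Prop := ∀ (word : String), Dom_longestBeautifulSubstring word → Spec_longestBeautifulSubstring word (longestBeautifulSubstring word)

-- ===== LEMMAS AND PROOFS =====

-- position i (for 1 <= i) is a strict increase
def pvIncr (s : List Char) (i : Nat) : Bool := decide (s.getD (i-1) ' ' < s.getD i ' ')

-- number of strict increases among positions 1..i
def pvCnt (s : List Char) (i : Nat) : Nat := (List.range' 1 i).countP (pvIncr s)

-- the index where A's inner loop stops when started at j
def pvRunEnd (s : List Char) (j : Nat) : Nat :=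
  if j < s.length ∧ s.getD (j-1) ' ' ≤ s.getD j ' ' then pvRunEnd s (j+1) else j
termination_by s.length - j
decreasing_by omega

theorem pvRunEnd_ge (s : List Char) (j : Nat) : j ≤ pvRunEnd s j := by
  rw [pvRunEnd]
  split
  · have := pvRunEnd_ge s (j+1); omega
  · omega
termination_by s.length - j
decreasing_by omega

theorem pvRunEnd_le (s : List Char) (j : Nat) (h : j ≤ s.length) :
    pvRunEnd s j ≤ s.length := by
  rw [pvRunEnd]
  split
  · next hg => exact pvRunEnd_le s (j+1) hg.1
  · exact h
termination_by s.length - j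
decreasing_by omega

-- at the stop index the loop guard fails
theorem pvRunEnd_break (s : List Char) (j : Nat) :
    ¬ (pvRunEnd s j < s.length ∧
       s.getD (pvRunEnd s j - 1) ' ' ≤ s.getD (pvRunEnd s j) ' ') := by
  rw [pvRunEnd]
  split
  · exact pvRunEnd_break s (j+1)
  · next hg => exact fun hc => hg hc
termination_by s.length - j
decreasing_by omega

-- every position strictly before the stop index satisfies the guard
theorem pvRunEnd_between (s : List Char) (j k : Nat) (h1 : j ≤ k)
    (h2 : k < pvRunEnd s j) :
    k < s.length ∧ s.getD (k-1) ' ' ≤ s.getD k ' ' := by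
  rw [pvRunEnd] at h2
  split at h2
  · next hg =>
    rcases Nat.eq_or_lt_of_le h1 with rfl | hlt
    · exact hg
    · exact pvRunEnd_between s (j+1) k hlt h2
  · omega
termination_by s.length - j
decreasing_by omega

-- the prefix array keeps its length throughout the loop
theorem pvPB_fold_length (s : List Char) (m : Nat) :
    ((List.range' 1 m).foldl
      (fun P i => P.set i (P.getD (i-1) 0 +
        (if s.getD (i-1) ' ' < s.getD i ' ' then 1 else 0)))
      (List.replicate (s.length + 1) (0 : Int))).length = s.length + 1 := by
  induction m with
  | zero => simp [List.range']
  | succ m ih =>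
    rw [List.range'_1_concat, List.foldl_append, List.foldl_cons, List.foldl_nil]
    simpa using ih

-- prefix-sum array correctness: after the loop up to m, P[k] counts increases in 1..k
theorem pvPB_fold (s : List Char) (m : Nat) (hm : m ≤ s.length - 1) :
    ∀ k : Nat,
      ((List.range' 1 m).foldl
        (fun P i => P.set i (P.getD (i-1) 0 +
          (if s.getD (i-1) ' ' < s.getD i ' ' then 1 else 0)))
        (List.replicate (s.length + 1) (0 : Int))).getD k 0
      = if k ≤ m then (pvCnt s k : Int) else 0 := by
  induction m with
  | zero =>
    intro k
    simp only [List.range', List.foldl_nil]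
    by_cases hk : k = 0
    · subst hk
      simp [pvCnt, List.range']
    · rw [if_neg (by omega), List.getD_eq_getElem?_getD]
      rcases Nat.lt_or_ge k (s.length + 1) with h | h
      · simp [h]
      · rw [List.getElem?_eq_none (by simpa using h)]; rfl
  | succ m ih =>
    intro k
    rw [List.range'_1_concat, List.foldl_append, List.foldl_cons, List.foldl_nil]
    have ihm := ih (by omega)
    set Q := (List.range' 1 m).foldl
        (fun P i => P.set i (P.getD (i-1) 0 +
          (if s.getD (i-1) ' ' < s.getD i ' ' then 1 else 0)))
        (List.replicate (s.length + 1) (0 : Int)) with hQ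
    have hlen : Q.length = s.length + 1 := pvPB_fold_length s m
    have hidx : 1 + m - 1 = m := by omega
    by_cases hk : k = 1 + m
    · subst hk
      have hmk : 1 + m = m + 1 := Nat.add_comm 1 m
      rw [hmk]
      rw [List.getD_eq_getElem?_getD,
        List.getElem?_set_self (by rw [hlen]; omega), Option.getD_some,
        Nat.add_sub_cancel, if_pos le_rfl]
      have h1 : Q.getD m 0 = (pvCnt s m : Int) := by rw [ihm m, if_pos le_rfl]
      have h2 : (pvCnt s (m+1) : Int)
          = (pvCnt s m : Int) + (if s.getD m ' ' < s.getD (m+1) ' ' then 1 else 0) := by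
        unfold pvCnt
        rw [List.range'_1_concat, List.countP_append, List.countP_cons, List.countP_nil]
        rw [hmk]
        unfold pvIncr
        rw [Nat.add_sub_cancel]
        push_cast
        simp only [decide_eq_true_eq]
        split_ifs <;> simp
      rw [h1, h2]
    · rw [List.getD_eq_getElem?_getD, List.getElem?_set_ne (fun h => hk h.symm),
        ← List.getD_eq_getElem?_getD, ihm]
      by_cases h1 : k ≤ m
      · rw [if_pos h1, if_pos (by omega)]
      · rw [if_neg h1, if_neg (by omega)]

theorem pvPB_getD (s : List Char) (i : Nat) (hi : i < s.length) :
    (pvPB s).getD i 0 = (pvCnt s i : Int) := by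
  unfold pvPB
  rw [pvPB_fold s (s.length - 1) le_rfl i, if_pos (by omega)]

-- splitting the increase count at a
theorem pvCnt_add (s : List Char) (a m : Nat) :
    pvCnt s (a + m) = pvCnt s a + (List.range' (a+1) m).countP (pvIncr s) := by
  unfold pvCnt
  rw [← List.range'_append_1, List.countP_append, Nat.add_comm 1 a]

-- A's inner loop: stops at pvRunEnd and adds exactly the strict increases seen
theorem pvInnerA_spec (s : List Char) (j : Nat) (st : PySem.Set Char)
    (h1 : 1 ≤ j) (hmem : s.getD (j-1) ' ' ∈ st)
    (hub : ∀ x ∈ st, x ≤ s.getD (j-1) ' ') :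
    (pvInnerA s st j).2 = pvRunEnd s j ∧
    (pvInnerA s st j).1.length
      = st.length + (List.range' j (pvRunEnd s j - j)).countP (pvIncr s) := by
  rw [pvInnerA, pvRunEnd]
  split
  · next hg =>
    have hb1 : j + 1 ≤ pvRunEnd s (j+1) := pvRunEnd_ge s (j+1)
    have hmem' : s.getD ((j+1)-1) ' ' ∈ PySem.Set.add st (s.getD j ' ') := by
      simp only [Nat.add_sub_cancel]
      exact (PySem.Set.mem_add st (s.getD j ' ') (s.getD j ' ')).mpr (Or.inr rfl)
    have hub' : ∀ x ∈ PySem.Set.add st (s.getD j ' '), x ≤ s.getD ((j+1)-1) ' ' := by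
      simp only [Nat.add_sub_cancel]
      intro x hx
      rcases (PySem.Set.mem_add _ _ _).mp hx with h | h
      · exact le_trans (hub x h) hg.2
      · exact le_of_eq h
    obtain ⟨ih2, ih1⟩ := pvInnerA_spec s (j+1) (PySem.Set.add st (s.getD j ' '))
      (by omega) hmem' hub'
    refine ⟨ih2, ?_⟩
    rw [ih1]
    have hstlen : (PySem.Set.add st (s.getD j ' ')).length
        = st.length + (if pvIncr s j then 1 else 0) := by
      by_cases hin : s.getD j ' ' ∈ st
      · have hn : pvIncr s j = false := by
          unfold pvIncr
          simp only [decide_eq_false_iff_not]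
          exact fun hlt => absurd (hub _ hin) (not_le.mpr hlt)
        rw [PySem.Set.add_of_mem hin, hn]
        simp
      · have hne : s.getD j ' ' ≠ s.getD (j-1) ' ' := fun he => hin (he ▸ hmem)
        have hy : pvIncr s j = true := by
          unfold pvIncr
          exact decide_eq_true (lt_of_le_of_ne hg.2 (Ne.symm hne))
        rw [PySem.Set.add_of_not_mem hin, hy]
        simp
    rw [hstlen]
    have hsplit : List.range' j (pvRunEnd s (j+1) - j)
        = j :: List.range' (j+1) (pvRunEnd s (j+1) - (j+1)) := by
      have he : pvRunEnd s (j+1) - j = (pvRunEnd s (j+1) - (j+1)) + 1 := by omega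
      rw [he, List.range'_succ]
    rw [hsplit, List.countP_cons]
    split_ifs <;> omega
  · next hg =>
    simp
termination_by s.length - j
decreasing_by omega

-- B's bounds list, started from an arbitrary index
def pvBoundsFrom (s : List Char) (a : Nat) : List Nat :=
  (List.range' a (s.length - a)).filter (pvIsStartB s) ++ [s.length]

theorem pvBoundsFrom_zero (s : List Char) : pvBoundsB s = pvBoundsFrom s 0 := by
  unfold pvBoundsB pvBoundsFrom
  rw [List.range_eq_range']
  simp

-- at a run start a < n, bounds = a :: bounds-from-the-next-run-start
theorem pvBoundsFrom_cons (s : List Char) (a : Nat) (ha : a < s.length)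
    (hstart : pvIsStartB s a = true) :
    pvBoundsFrom s a = a :: pvBoundsFrom s (pvRunEnd s (a+1)) := by
  have hb1 : a + 1 ≤ pvRunEnd s (a+1) := pvRunEnd_ge s (a+1)
  have hb2 : pvRunEnd s (a+1) ≤ s.length := pvRunEnd_le s (a+1) (by omega)
  set b := pvRunEnd s (a+1) with hbdef
  unfold pvBoundsFrom
  have hsp1 : List.range' a (s.length - a) = a :: List.range' (a+1) (s.length - (a+1)) := by
    have he : s.length - a = (s.length - (a+1)) + 1 := by omega
    rw [he, List.range'_succ]
  have hsp2 : List.range' (a+1) (s.length - (a+1))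
      = List.range' (a+1) (b - (a+1)) ++ List.range' ((a+1) + (b - (a+1))) (s.length - b) := by
    rw [List.range'_append_1]
    congr 1
    omega
  have he2 : (a+1) + (b - (a+1)) = b := by omega
  rw [he2] at hsp2
  have hmid : (List.range' (a+1) (b - (a+1))).filter (pvIsStartB s) = [] := by
    rw [List.filter_eq_nil_iff]
    intro k hk
    rw [List.mem_range'_1] at hk
    have hbet := pvRunEnd_between s (a+1) k hk.1 (by omega)
    unfold pvIsStartB
    simp only [Bool.or_eq_true, beq_iff_eq, decide_eq_true_eq, not_or]
    exact ⟨by omega, fun hlt => absurd hbet.2 (not_le.mpr hlt)⟩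
  rw [hsp1, hsp2, List.filter_cons, if_pos hstart, List.filter_append, hmid,
    List.nil_append, List.cons_append]

-- the bounds list from b always starts with b (b a run start or b = n)
theorem pvBoundsFrom_head (s : List Char) (b : Nat) (hb : b ≤ s.length)
    (hstart : b < s.length → pvIsStartB s b = true) :
    ∃ l, pvBoundsFrom s b = b :: l := by
  rcases Nat.eq_or_lt_of_le hb with rfl | hlt
  · exact ⟨[], by unfold pvBoundsFrom; simp⟩
  · rw [pvBoundsFrom_cons s b hlt (hstart hlt)]
    exact ⟨_, rfl⟩

-- main correspondence: A's outer loop = B's fold over consecutive bound pairs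
theorem pvMainM (s : List Char) (a : Nat) (res : Int) (ha : a ≤ s.length)
    (hstart : a < s.length → pvIsStartB s a = true) :
    pvOuterA s res a = pvZipFoldB (pvPB s) res (pvBoundsFrom s a) := by
  rcases Nat.eq_or_lt_of_le ha with rfl | hlt
  · rw [pvOuterA, dif_neg (lt_irrefl _)]
    unfold pvBoundsFrom pvZipFoldB
    simp
  · have hb1 : a + 1 ≤ pvRunEnd s (a+1) := pvRunEnd_ge s (a+1)
    have hb2 : pvRunEnd s (a+1) ≤ s.length := pvRunEnd_le s (a+1) (by omega)
    have hmem0 : s.getD ((a+1)-1) ' '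
        ∈ PySem.Set.add PySem.Set.empty (s.getD a ' ') := by
      simp only [Nat.add_sub_cancel]
      exact (PySem.Set.mem_add PySem.Set.empty (s.getD a ' ') (s.getD a ' ')).mpr (Or.inr rfl)
    have hub0 : ∀ x ∈ PySem.Set.add PySem.Set.empty (s.getD a ' '),
        x ≤ s.getD ((a+1)-1) ' ' := by
      simp only [Nat.add_sub_cancel]
      intro x hx
      rcases (PySem.Set.mem_add _ _ _).mp hx with h | h
      · exact absurd h List.not_mem_nil
      · exact le_of_eq h
    obtain ⟨hi2, hi1⟩ := pvInnerA_spec s (a+1)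
      (PySem.Set.add PySem.Set.empty (s.getD a ' ')) (by omega) hmem0 hub0
    have hlen0 : (PySem.Set.add PySem.Set.empty (s.getD a ' ')).length = 1 := by
      simp [PySem.Set.empty]
    rw [hlen0] at hi1
    -- the run end is itself a run start (or n)
    have hbstart : pvRunEnd s (a+1) < s.length → pvIsStartB s (pvRunEnd s (a+1)) = true := by
      intro hbn
      have hbr := pvRunEnd_break s (a+1)
      have hlt2 : s.getD (pvRunEnd s (a+1)) ' ' < s.getD (pvRunEnd s (a+1) - 1) ' ' := by
        by_contra hcon
        exact hbr ⟨hbn, le_of_not_gt (by simpa using hcon)⟩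
      unfold pvIsStartB
      simp only [Bool.or_eq_true, beq_iff_eq, decide_eq_true_eq]
      exact Or.inr hlt2
    obtain ⟨l, hl⟩ := pvBoundsFrom_head s (pvRunEnd s (a+1)) hb2 hbstart
    -- one unfolding of A's outer loop
    have houter : pvOuterA s res a
        = pvOuterA s
            (if (pvInnerA s (PySem.Set.add PySem.Set.empty (s.getD a ' ')) (a+1)).1.length = 5
             then max res (((pvInnerA s (PySem.Set.add PySem.Set.empty (s.getD a ' ')) (a+1)).2 : Int) - (a : Int))
             else res)
            (pvInnerA s (PySem.Set.add PySem.Set.empty (s.getD a ' ')) (a+1)).2 := by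
      rw [pvOuterA, dif_pos hlt]
    -- the two recorded conditions agree
    have hC : pvCnt s (pvRunEnd s (a+1) - 1)
        = pvCnt s a + (List.range' (a+1) (pvRunEnd s (a+1) - (a+1))).countP (pvIncr s) := by
      have h := pvCnt_add s a (pvRunEnd s (a+1) - 1 - a)
      have he : a + (pvRunEnd s (a+1) - 1 - a) = pvRunEnd s (a+1) - 1 := by omega
      have he2 : pvRunEnd s (a+1) - 1 - a = pvRunEnd s (a+1) - (a+1) := by omega
      rw [he, he2] at h
      exact h
    have hPa := pvPB_getD s a hlt
    have hPb := pvPB_getD s (pvRunEnd s (a+1) - 1) (by omega)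
    have hres :
        (if (pvInnerA s (PySem.Set.add PySem.Set.empty (s.getD a ' ')) (a+1)).1.length = 5
         then max res (((pvInnerA s (PySem.Set.add PySem.Set.empty (s.getD a ' ')) (a+1)).2 : Int) - (a : Int))
         else res)
        = (if (pvPB s).getD (pvRunEnd s (a+1) - 1) 0 - (pvPB s).getD a 0 = 4
           then max res ((pvRunEnd s (a+1) : Int) - (a : Int)) else res) := by
      rw [hi1, hi2, hPa, hPb]
      by_cases h5 : 1 + (List.range' (a+1) (pvRunEnd s (a+1) - (a+1))).countP (pvIncr s) = 5
      · rw [if_pos h5, if_pos (by rw [hC]; push_cast; omega)]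
      · rw [if_neg h5, if_neg (by rw [hC]; push_cast; omega)]
    -- recurse at the next run start
    have hrec := pvMainM s (pvRunEnd s (a+1))
      (if (pvPB s).getD (pvRunEnd s (a+1) - 1) 0 - (pvPB s).getD a 0 = 4
       then max res ((pvRunEnd s (a+1) : Int) - (a : Int)) else res) hb2 hbstart
    rw [hl] at hrec
    unfold pvZipFoldB at hrec
    rw [List.tail_cons] at hrec
    -- assemble B's side
    rw [houter, hres, hi2, pvBoundsFrom_cons s a hlt (hstart hlt), hl]
    unfold pvZipFoldB
    rw [List.tail_cons, List.zip_cons_cons, List.foldl_cons]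
    exact hrec
termination_by s.length - a
decreasing_by omega

-- ===== VERDICT (by name: the statement is the Claim_ definition above) =====
theorem longestBeautifulSubstring_spec : Claim_equal_longestBeautifulSubstring := by
  intro word _
  unfold Spec_longestBeautifulSubstring longestBeautifulSubstring longestBeautifulSubstring_alt
  rw [pvBoundsFrom_zero]
  exact pvMainM word.toList 0 0 (Nat.zero_le _) (fun _ => by simp [pvIsStartB])
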